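-- pv_equiv track=rewrite | github.com/HuyaneMatsu/hata | hata/backend/utils.py | relative_index
-- ===== SOURCE A (Python) =====
-- def relative_index(list_, value):
--     """
--     Returns on which the given `value` would be inserted into the given list.
--
--     Parameters
--     ----------
--     list_ : `list` of `Any`
--         The list o which value would be inserted.
--     value : `Any`
--         The value what would be inserted.
--
--     Returns
--     -------
--     relative_index : `int`
--     """
--     bot = 0
--     top = len(list_)
--
--     while True:
--         if bot < top:
--             half = (bot+top)>>1
--             if list_[half] < value:
--                 bot = half+1
--             else:
--                 top = half
--             continue
--         return bot
-- ===== SOURCE B (Python) =====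
-- def relative_index(list_, value):
--     if not list_:
--         return 0
--     mid = len(list_) >> 1
--     if list_[mid] < value:
--         return mid + 1 + relative_index(list_[mid + 1:], value)
--     return relative_index(list_[:mid], value)
-- ===== Notes on version B (the rewrite author's own statement) =====
-- stated objective: alternative
-- what changed: Replaces A's in-place bot/top index window loop by structural recursion on list slices: split at mid = len>>1, recurse on list_[mid+1:] adding the offset mid+1, or on list_[:mid]; same comparison sequence, so the exact same index on every list, sorted or not.
import Mathlib
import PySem

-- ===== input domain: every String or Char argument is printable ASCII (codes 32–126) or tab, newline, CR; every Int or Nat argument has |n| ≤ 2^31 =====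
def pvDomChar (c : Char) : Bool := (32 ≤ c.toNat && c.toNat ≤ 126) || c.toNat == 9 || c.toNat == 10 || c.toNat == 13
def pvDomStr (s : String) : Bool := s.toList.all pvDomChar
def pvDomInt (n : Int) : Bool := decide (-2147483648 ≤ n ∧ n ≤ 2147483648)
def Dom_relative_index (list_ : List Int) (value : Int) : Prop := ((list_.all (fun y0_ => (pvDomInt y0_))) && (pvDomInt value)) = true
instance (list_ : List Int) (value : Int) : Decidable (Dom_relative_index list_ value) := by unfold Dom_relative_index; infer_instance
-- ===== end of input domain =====

-- B replaces A's in-place bot/top window loop by recursion on list slices (each call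
-- splits off the half actually searched and adds the offset); objective: alternative
-- decomposition, not faster.

-- ===== PORT A =====
-- A's 'while True' loop over the (bot, top) window; terminates because top - bot shrinks.
def relAGo (list_ : List Int) (value : Int) (bot top : Int) : Int :=
  if h : bot < top then
    -- half = (bot+top) >> 1 : Python's >>1 is floor division by 2, exactly PySem.Int.floordiv
    let half := PySem.Int.floordiv (bot + top) 2
    -- list_[half]: the index is always in range here (0 ≤ bot ≤ half < top ≤ len), so pyGetD is exact
    if PySem.List.pyGetD list_ half 0 < value then
      relAGo list_ value (half + 1) top
    else
      relAGo list_ value bot half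
  else bot
termination_by (top - bot).toNat
decreasing_by
  · have h1 := PySem.Int.le_floordiv_iff_mul_le (a := bot + top) (b := 2) (q := bot) (by omega)
    have h2 := PySem.Int.floordiv_lt_iff_lt_mul (a := bot + top) (b := 2) (q := top) (by omega)
    omega
  · have h1 := PySem.Int.le_floordiv_iff_mul_le (a := bot + top) (b := 2) (q := bot) (by omega)
    have h2 := PySem.Int.floordiv_lt_iff_lt_mul (a := bot + top) (b := 2) (q := top) (by omega)
    omega

def relative_index (list_ : List Int) (value : Int) : Int :=
  relAGo list_ value 0 (list_.length : Int)

-- ===== PORT B =====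
-- Source B: recursion on slices; len(list_) >> 1 is the Nat shift; list_[mid] is always in
-- range (mid = len >> 1 < len for nonempty list_), so pyGetD is exact; the slices
-- list_[mid+1:] and list_[:mid] are PySem.List.slice.
def relative_index_alt (list_ : List Int) (value : Int) : Int :=
  if list_ = [] then 0
  else
    if PySem.List.pyGetD list_ ((list_.length >>> 1 : Nat) : Int) 0 < value then
      ((list_.length >>> 1 : Nat) : Int) + 1
        + relative_index_alt (PySem.List.slice list_ (some (((list_.length >>> 1 : Nat) : Int) + 1)) none) value
    else
      relative_index_alt (PySem.List.slice list_ none (some ((list_.length >>> 1 : Nat) : Int))) value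
termination_by list_.length
decreasing_by
  · rename_i hne _
    rw [PySem.List.slice_from list_ (by positivity)]
    have : list_.length ≠ 0 := by simp [List.length_eq_zero_iff, hne]
    simp [Nat.shiftRight_one]
    omega
  · rename_i hne _
    rw [PySem.List.slice_to list_ (by positivity)]
    have : list_.length ≠ 0 := by simp [List.length_eq_zero_iff, hne]
    simp [Nat.shiftRight_one]
    omega

-- ===== PRECONDITION & SPEC =====
def Spec_relative_index (list_ : List Int) (value : Int) (out : Int) : Prop := out = relative_index_alt list_ value
instance (list_ : List Int) (value : Int) (out : Int) : Decidable (Spec_relative_index list_ value out) := by unfold Spec_relative_index; infer_instance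

-- ===== CLAIM (what is proved, stated in full; the proofs are below) =====
def Claim_equal_relative_index : Prop := ∀ (list_ : List Int) (value : Int), Dom_relative_index list_ value → Spec_relative_index list_ value (relative_index list_ value)

-- ===== LEMMAS AND PROOFS =====
-- A's window (bot, top) computes bot + B's answer on the corresponding sublist:
-- the midpoints coincide because (bot+top)//2 = bot + (top-bot)//2.
lemma go_eq (list_ : List Int) (value : Int) :
    ∀ (n : Nat) (bot top : Int), 0 ≤ bot → bot ≤ top → top ≤ (list_.length : Int) →
      (top - bot).toNat = n →
      relAGo list_ value bot top
        = bot + relative_index_alt ((list_.drop bot.toNat).take (top - bot).toNat) value := by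
  intro n
  induction n using Nat.strong_induction_on with
  | _ n IH =>
    intro bot top h0 hbt htop hn
    by_cases h : bot < top
    · -- nonempty window
      have hq1 := (PySem.Int.le_floordiv_iff_mul_le (a := bot + top) (b := 2) (q := bot) (by omega)).mpr (by omega)
      have hq2 := (PySem.Int.floordiv_lt_iff_lt_mul (a := bot + top) (b := 2) (q := top) (by omega)).mpr (by omega)
      set half := PySem.Int.floordiv (bot + top) 2 with hhalfdef
      set d : Nat := (top - bot).toNat with hd
      set m : Nat := d / 2 with hm
      have hd2a : 2 * m ≤ d := by omega
      have hd2b : d < 2 * m + 2 := by omega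
      have hhalf : half = bot + (m : Int) := by
        rw [hhalfdef, PySem.Int.floordiv_eq_iff_of_pos (by omega)]
        omega
      set b : Nat := bot.toNat with hb
      have hbint : (b : Int) = bot := Int.toNat_of_nonneg h0
      set sub : List Int := (list_.drop b).take d with hsub
      have hsublen : sub.length = d := by
        simp [hsub, List.length_take, List.length_drop]
        omega
      have hsubne : sub ≠ [] := by
        intro hc
        have := congrArg List.length hc
        simp [hsublen] at this
        omega
      have helem : PySem.List.pyGetD sub ((m : Nat) : Int) 0 = PySem.List.pyGetD list_ half 0 := by
        rw [hhalf, show bot + (m : Int) = (((b + m : Nat)) : Int) by push_cast; omega]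
        rw [PySem.List.pyGetD_natCast, PySem.List.pyGetD_natCast]
        simp [hsub, List.getD_eq_getElem?_getD, List.getElem?_drop,
              List.getElem?_take_of_lt (show m < d by omega)]
      rw [relAGo]
      simp only [dif_pos h]
      rw [relative_index_alt]
      simp only [if_neg hsubne, hsublen, Nat.shiftRight_one, ← hm, ← hhalfdef]
      by_cases hc : PySem.List.pyGetD list_ half 0 < value
      · rw [if_pos hc, if_pos (helem ▸ hc)]
        rw [IH ((top - (half + 1)).toNat) (by omega) (half + 1) top (by omega) (by omega) htop rfl]
        have hdrop : PySem.List.slice sub (some ((m : Int) + 1))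
            = (list_.drop (half + 1).toNat).take (top - (half + 1)).toNat := by
          rw [PySem.List.slice_from sub (by positivity)]
          rw [show ((m : Int) + 1).toNat = m + 1 by omega]
          rw [hsub, List.drop_take, List.drop_drop]
          congr 1
          · omega
          · congr 1
            omega
        rw [hdrop]
        ring_nf
        omega
      · rw [if_neg hc, if_neg (fun hx => hc (helem ▸ hx))]
        rw [IH ((half - bot).toNat) (by omega) bot half h0 (by omega) (by omega) rfl]
        have htake : PySem.List.slice sub none (some (m : Int))
            = (list_.drop bot.toNat).take (half - bot).toNat := by
          rw [PySem.List.slice_to sub (by positivity)]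
          rw [hsub, List.take_take]
          congr 1
          omega
        rw [htake]
    · -- empty window: bot = top
      rw [relAGo]
      simp only [dif_neg h]
      have : (top - bot).toNat = 0 := by omega
      simp [this, relative_index_alt]

-- ===== VERDICT (by name: the statement is the Claim_ definition above) =====
theorem relative_index_spec : Claim_equal_relative_index := by
  intro list_ value _
  unfold Spec_relative_index relative_index
  rw [go_eq list_ value (((list_.length : Int) - 0).toNat) 0 (list_.length : Int)
        le_rfl (by positivity) le_rfl rfl]
  simp
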